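-- pv_equiv track=rewrite | github.com/elian204/sktr_for_long_traces | src/evaluation.py | _get_labels_start_end_time_asformer
-- ===== SOURCE A (Python) =====
-- from typing import Any, Dict, Iterable, List, Optional, Sequence, Tuple, Union
--
-- def _get_labels_start_end_time_asformer(
--     frame_wise_labels: Sequence[Any],
--     bg_class: Sequence[Any],
-- ) -> Tuple[List[Any], List[int], List[int]]:
--     labels: List[Any] = []
--     starts: List[int] = []
--     ends: List[int] = []
--     if not frame_wise_labels:
--         return labels, starts, ends
--     last_label = frame_wise_labels[0]
--     if frame_wise_labels[0] not in bg_class: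
--         labels.append(frame_wise_labels[0])
--         starts.append(0)
--     for i in range(len(frame_wise_labels)):
--         if frame_wise_labels[i] != last_label:
--             if frame_wise_labels[i] not in bg_class:
--                 labels.append(frame_wise_labels[i])
--                 starts.append(i)
--             if last_label not in bg_class:
--                 ends.append(i)
--             last_label = frame_wise_labels[i]
--     if last_label not in bg_class:
--         ends.append(i)
--     return labels, starts, ends
-- ===== SOURCE B (Python) =====
-- def _get_labels_start_end_time_asformer(frame_wise_labels, bg_class):
--     labels, starts, ends = [], [], []
--     n = len(frame_wise_labels)
--     if n == 0:
--         return labels, starts, ends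
--     # pass 1: one run per boundary -- (label, start index)
--     runs = [(frame_wise_labels[0], 0)] + [
--         (frame_wise_labels[i], i)
--         for i in range(1, n)
--         if frame_wise_labels[i] != frame_wise_labels[i - 1]
--     ]
--     # pass 2: each run ends where the next one starts; the last run ends at n - 1
--     bounds = [s for _, s in runs[1:]] + [n - 1]
--     for (lab, s), e in zip(runs, bounds):
--         if lab not in bg_class:
--             labels.append(lab)
--             starts.append(s)
--             ends.append(e)
--     return labels, starts, ends
-- ===== Notes on version B (the rewrite author's own statement) =====
-- stated objective: alternative
-- what changed: Replaces A's single stateful scan (mutable last_label with interleaved appends to three lists) by a three-phase decomposition: one boundary pass building (label, start) runs, a bounds pass pairing each run with the next run's start (last run ends at n-1), then a zip-and-filter over runs.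
import Mathlib
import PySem

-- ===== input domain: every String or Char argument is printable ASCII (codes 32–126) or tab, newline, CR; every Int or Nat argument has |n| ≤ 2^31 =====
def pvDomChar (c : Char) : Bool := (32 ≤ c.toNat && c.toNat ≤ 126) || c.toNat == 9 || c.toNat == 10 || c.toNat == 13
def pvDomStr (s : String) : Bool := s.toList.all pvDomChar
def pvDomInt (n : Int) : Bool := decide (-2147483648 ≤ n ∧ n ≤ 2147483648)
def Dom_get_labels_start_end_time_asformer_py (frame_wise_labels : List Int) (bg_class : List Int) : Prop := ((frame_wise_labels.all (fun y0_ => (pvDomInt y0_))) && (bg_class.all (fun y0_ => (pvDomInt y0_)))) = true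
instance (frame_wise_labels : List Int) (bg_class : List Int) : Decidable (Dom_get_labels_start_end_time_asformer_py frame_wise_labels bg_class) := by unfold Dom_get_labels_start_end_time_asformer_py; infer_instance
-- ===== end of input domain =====

-- B replaces A's single stateful scan by a boundary pass (runs = (label, start)), a
-- bounds pass (each run ends at the next run's start, the last at n-1) and a filter;
-- objective: alternative decomposition, same cost.

-- ===== PORT A =====
-- A's for-loop over range(len(xs)): structural recursion consuming xs with the loop
-- index i and the mutable state (labels, starts, ends, last_label) carried explicitly.
def pvLoopA (bg : List Int) : List Int → Int → Int → List Int → List Int → List Int →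
    List Int × List Int × List Int × Int
  | [], _, last, labels, starts, ends => (labels, starts, ends, last)
  | c :: rs, i, last, labels, starts, ends =>
    if c ≠ last then
      let labels := if c ∈ bg then labels else labels ++ [c]
      let starts := if c ∈ bg then starts else starts ++ [i]
      let ends := if last ∈ bg then ends else ends ++ [i]
      pvLoopA bg rs (i + 1) c labels starts ends
    else
      pvLoopA bg rs (i + 1) last labels starts ends

def get_labels_start_end_time_asformer_py (frame_wise_labels : List Int) (bg_class : List Int) : List Int × List Int × List Int :=
  match frame_wise_labels with
  | [] => ([], [], [])
  | x0 :: _ =>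
    let labels : List Int := if x0 ∈ bg_class then [] else [x0]
    let starts : List Int := if x0 ∈ bg_class then [] else [0]
    let st := pvLoopA bg_class frame_wise_labels 0 x0 labels starts []
    -- after the loop, Python's i = len(frame_wise_labels) - 1
    (st.1, st.2.1, if st.2.2.2 ∈ bg_class then st.2.2.1 else st.2.2.1 ++ [(frame_wise_labels.length : Int) - 1])

-- ===== PORT B =====
-- the comprehension [(xs[i], i) for i in range(1, n) if xs[i] != xs[i-1]]:
-- walk the tail carrying the previous value and the index i.
def pvChangeRuns : Int → Int → List Int → List (Int × Int)
  | _, _, [] => []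
  | prev, i, c :: rs =>
    if c ≠ prev then (c, i) :: pvChangeRuns c (i + 1) rs
    else pvChangeRuns c (i + 1) rs

def get_labels_start_end_time_asformer_py_alt (frame_wise_labels : List Int) (bg_class : List Int) : List Int × List Int × List Int :=
  match frame_wise_labels with
  | [] => ([], [], [])
  | x0 :: rest =>
    let n : Int := frame_wise_labels.length
    let runs : List (Int × Int) := (x0, 0) :: pvChangeRuns x0 1 rest
    let bounds : List Int := (runs.drop 1).map (·.2) ++ [n - 1]
    (runs.zip bounds).foldl
      (fun acc p =>
        if p.1.1 ∈ bg_class then acc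
        else (acc.1 ++ [p.1.1], acc.2.1 ++ [p.1.2], acc.2.2 ++ [p.2]))
      ([], [], [])

-- ===== PRECONDITION & SPEC =====
def Spec_get_labels_start_end_time_asformer_py (frame_wise_labels : List Int) (bg_class : List Int) (out : List Int × List Int × List Int) : Prop := out = get_labels_start_end_time_asformer_py_alt frame_wise_labels bg_class
instance (frame_wise_labels : List Int) (bg_class : List Int) (out : List Int × List Int × List Int) : Decidable (Spec_get_labels_start_end_time_asformer_py frame_wise_labels bg_class out) := by unfold Spec_get_labels_start_end_time_asformer_py; infer_instance

-- ===== CLAIM (what is proved, stated in full; the proofs are below) =====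
def Claim_equal_get_labels_start_end_time_asformer_py : Prop := ∀ (frame_wise_labels : List Int) (bg_class : List Int), Dom_get_labels_start_end_time_asformer_py frame_wise_labels bg_class → Spec_get_labels_start_end_time_asformer_py frame_wise_labels bg_class (get_labels_start_end_time_asformer_py frame_wise_labels bg_class)

-- ===== LEMMAS AND PROOFS =====

-- reference shape: the tail contribution of A's loop started at index i with current
-- run label `cur` (whose label/start are already emitted), finalization included.
def pvTailOut (bg : List Int) : Int → Int → List Int → List Int × List Int × List Int
  | cur, i, [] => ([], [], if cur ∈ bg then [] else [i - 1])
  | cur, i, c :: rs =>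
    if c ≠ cur then
      let t := pvTailOut bg c (i + 1) rs
      ((if c ∈ bg then t.1 else c :: t.1),
       (if c ∈ bg then t.2.1 else i :: t.2.1),
       (if cur ∈ bg then t.2.2 else i :: t.2.2))
    else pvTailOut bg cur (i + 1) rs

-- cons-shaped version of B's filtering fold
def pvG (bg : List Int) : List ((Int × Int) × Int) → List Int × List Int × List Int
  | [] => ([], [], [])
  | p :: t =>
    let u := pvG bg t
    if p.1.1 ∈ bg then u else (p.1.1 :: u.1, p.1.2 :: u.2.1, p.2 :: u.2.2)

theorem pvLoopA_eq_tailOut (bg : List Int) (rest : List Int) :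
    ∀ (i cur : Int) (labels starts ends : List Int),
    (let st := pvLoopA bg rest i cur labels starts ends
     (st.1, st.2.1, if st.2.2.2 ∈ bg then st.2.2.1 else st.2.2.1 ++ [i + (rest.length : Int) - 1]))
    = (labels ++ (pvTailOut bg cur i rest).1,
       starts ++ (pvTailOut bg cur i rest).2.1,
       ends ++ (pvTailOut bg cur i rest).2.2) := by
  induction rest with
  | nil =>
    intro i cur labels starts ends
    simp only [pvLoopA, pvTailOut, List.length_nil]
    split_ifs <;> simp
  | cons c rs ih =>
    intro i cur labels starts ends
    have hlen : i + ((c :: rs).length : Int) - 1 = (i + 1) + (rs.length : Int) - 1 := by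
      simp only [List.length_cons]; push_cast; ring
    by_cases hc : c = cur
    · subst hc
      rw [show pvLoopA bg (c :: rs) i c labels starts ends
            = pvLoopA bg rs (i + 1) c labels starts ends from by simp [pvLoopA]]
      rw [show pvTailOut bg c i (c :: rs) = pvTailOut bg c (i + 1) rs from by simp [pvTailOut]]
      simp only [hlen]
      exact ih (i + 1) c labels starts ends
    · rw [show pvLoopA bg (c :: rs) i cur labels starts ends
            = pvLoopA bg rs (i + 1) c
                (if c ∈ bg then labels else labels ++ [c])
                (if c ∈ bg then starts else starts ++ [i])
                (if cur ∈ bg then ends else ends ++ [i]) from by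
          simp only [pvLoopA, if_pos (show c ≠ cur from hc)]]
      simp only [hlen]
      rw [ih (i + 1) c _ _ _]
      simp only [pvTailOut, if_pos (show c ≠ cur from hc)]
      split_ifs <;> simp

theorem pvFoldl_eq_G (bg : List Int) (L : List ((Int × Int) × Int)) :
    ∀ (a b c : List Int),
    L.foldl
      (fun acc p =>
        if p.1.1 ∈ bg then acc
        else (acc.1 ++ [p.1.1], acc.2.1 ++ [p.1.2], acc.2.2 ++ [p.2]))
      (a, b, c)
    = (a ++ (pvG bg L).1, b ++ (pvG bg L).2.1, c ++ (pvG bg L).2.2) := by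
  induction L with
  | nil => intro a b c; simp [pvG]
  | cons p t ih =>
    intro a b c
    simp only [List.foldl_cons, pvG]
    by_cases h : p.1.1 ∈ bg
    · simp only [if_pos h, ih]
    · simp only [if_neg h, ih]
      simp

-- head end of the tail runs: first change index, or the final index if none
def pvE0 (fin : Int) : List (Int × Int) → Int
  | [] => fin
  | (_, s) :: _ => s

theorem pvZipHead (p : Int × Int) (cr' : List (Int × Int)) (fin : Int) :
    ((p :: cr').zip ((cr'.map (·.2)) ++ [fin]))
    = (p, pvE0 fin cr') :: (cr'.zip (((cr'.drop 1).map (·.2)) ++ [fin])) := by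
  cases cr' with
  | nil => simp [pvE0]
  | cons q t => simp [pvE0, List.zip]

theorem pvTailOut_eq_G (bg : List Int) (rest : List Int) :
    ∀ (i cur : Int),
    pvTailOut bg cur i rest
    = (let cr := pvChangeRuns cur i rest
       let fin := i + (rest.length : Int) - 1
       let u := pvG bg (cr.zip ((cr.drop 1).map (·.2) ++ [fin]))
       (u.1, u.2.1, if cur ∈ bg then u.2.2 else pvE0 fin cr :: u.2.2)) := by
  induction rest with
  | nil => intro i cur; simp [pvTailOut, pvChangeRuns, pvG, pvE0]
  | cons c rs ih =>
    intro i cur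
    have hlen : i + ((c :: rs).length : Int) - 1 = (i + 1) + (rs.length : Int) - 1 := by
      simp only [List.length_cons]; push_cast; ring
    by_cases hc : c = cur
    · subst hc
      rw [show pvTailOut bg c i (c :: rs) = pvTailOut bg c (i + 1) rs from by simp [pvTailOut]]
      rw [show pvChangeRuns c i (c :: rs) = pvChangeRuns c (i + 1) rs from by simp [pvChangeRuns]]
      simp only [hlen]
      exact ih (i + 1) c
    · rw [show pvChangeRuns cur i (c :: rs) = (c, i) :: pvChangeRuns c (i + 1) rs from by
          simp only [pvChangeRuns, if_pos (show c ≠ cur from hc)]]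
      simp only [hlen, List.drop_one, List.tail_cons]
      rw [pvZipHead]
      simp only [pvTailOut, if_pos (show c ≠ cur from hc)]
      rw [ih (i + 1) c]
      simp only [pvG, pvE0, List.drop_one]
      split_ifs <;> simp_all

-- ===== VERDICT (by name: the statement is the Claim_ definition above) =====
theorem get_labels_start_end_time_asformer_py_spec : Claim_equal_get_labels_start_end_time_asformer_py := by
  intro xs bg _
  unfold Spec_get_labels_start_end_time_asformer_py
  cases xs with
  | nil => rfl
  | cons x0 rest =>
    unfold get_labels_start_end_time_asformer_py get_labels_start_end_time_asformer_py_alt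
    simp only
    -- A's loop: first iteration is a no-op (xs[0] == last_label)
    have h0 : pvLoopA bg (x0 :: rest) 0 x0
        (if x0 ∈ bg then [] else [x0]) (if x0 ∈ bg then [] else [0]) []
        = pvLoopA bg rest 1 x0
        (if x0 ∈ bg then [] else [x0]) (if x0 ∈ bg then [] else [0]) [] := by
      simp [pvLoopA]
    rw [h0] at *
    have hA := pvLoopA_eq_tailOut bg rest 1 x0
      (if x0 ∈ bg then [] else [x0]) (if x0 ∈ bg then [] else [0]) []
    have hfin : (1 : Int) + (rest.length : Int) - 1 = ((x0 :: rest).length : Int) - 1 := by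
      simp
    rw [hfin] at hA
    rw [pvFoldl_eq_G]
    rw [List.drop_one, List.tail_cons, pvZipHead]
    rw [pvTailOut_eq_G bg rest 1 x0] at hA
    simp only [hfin] at hA
    simp only [pvG]
    rw [hA]
    by_cases hx : x0 ∈ bg <;> simp [hx]
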